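-- pv_equiv track=rewrite | github.com/JPelda/memphis_old | class/Data_IO.py | dict_of_nested_lists_to_list
-- ===== SOURCE A (Python) =====
-- def dict_of_nested_lists_to_list(dictionary):
--     dictionary = [dictionary[x] for x in dictionary.keys()]
--     arr = []
--     for item in dictionary:
--         if type(item) == list:
--             for x in item:
--                 arr.append(x)
--         else:
--             if item is '*':
--                 arr = [item]
--                 break
--             else:
--                 arr.append(item)
--     ret = arr
--     return ret
-- ===== SOURCE B (Python) =====
-- def dict_of_nested_lists_to_list(dictionary):
--     return [x for value in dictionary.values() for x in value]
-- ===== Notes on version B (the rewrite author's own statement) =====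
-- stated objective: simpler
-- what changed: On the stated domain (dict of str -> list of str) every value is a list, so A's scalar/'*' break branch is dead code; B replaces the keys()-indexing pass and the break-driven element-append loop with a single flattening comprehension over dictionary.values().
import Mathlib
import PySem

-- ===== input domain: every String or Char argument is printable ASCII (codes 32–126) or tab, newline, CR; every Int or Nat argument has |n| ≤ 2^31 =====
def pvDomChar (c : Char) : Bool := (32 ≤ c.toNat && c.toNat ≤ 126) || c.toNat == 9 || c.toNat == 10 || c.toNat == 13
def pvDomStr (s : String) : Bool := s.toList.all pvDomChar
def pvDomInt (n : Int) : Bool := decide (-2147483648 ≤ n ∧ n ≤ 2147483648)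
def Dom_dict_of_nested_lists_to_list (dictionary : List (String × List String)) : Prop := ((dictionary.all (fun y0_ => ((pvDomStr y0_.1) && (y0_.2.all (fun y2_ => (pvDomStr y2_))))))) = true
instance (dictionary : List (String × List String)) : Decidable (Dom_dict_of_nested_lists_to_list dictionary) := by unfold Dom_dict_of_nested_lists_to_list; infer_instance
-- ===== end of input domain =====

-- B replaces A's keys()-indexing pass and break-driven append loop with a single flatten over the values (simpler; same cost).


-- ===== PORT A =====
-- A: rebuilds the values list via keys()-indexing, then loops appending each element of
-- each (always-list, by the declared type) value; the scalar/'*' branch is unreachable here.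
def dict_of_nested_lists_to_list (dictionary : List (String × List String)) : List String :=
  -- dictionary = [dictionary[x] for x in dictionary.keys()]  (a dict has unique keys: this is its values in order)
  let vals := dictionary.map Prod.snd
  -- for item in vals: for x in item: arr.append(x)
  let arr := vals.foldl (fun arr item => item.foldl (fun a x => a ++ [x]) arr) []
  arr

-- ===== PORT B =====
-- B: one flattening comprehension over the values (Source B).
def dict_of_nested_lists_to_list_alt (dictionary : List (String × List String)) : List String :=
  dictionary.flatMap (fun kv => kv.2)

-- ===== PRECONDITION & SPEC =====
def Spec_dict_of_nested_lists_to_list (dictionary : List (String × List String)) (out : List String) : Prop := out = dict_of_nested_lists_to_list_alt dictionary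
instance (dictionary : List (String × List String)) (out : List String) : Decidable (Spec_dict_of_nested_lists_to_list dictionary out) := by unfold Spec_dict_of_nested_lists_to_list; infer_instance

-- ===== CLAIM (what is proved, stated in full; the proofs are below) =====
def Claim_equal_dict_of_nested_lists_to_list : Prop := ∀ (dictionary : List (String × List String)), Dom_dict_of_nested_lists_to_list dictionary → Spec_dict_of_nested_lists_to_list dictionary (dict_of_nested_lists_to_list dictionary)

-- ===== LEMMAS AND PROOFS =====

-- ===== VERDICT (by name: the statement is the Claim_ definition above) =====
theorem pv_inner (l : List String) (arr : List String) :
    l.foldl (fun a x => a ++ [x]) arr = arr ++ l := by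
  induction l generalizing arr with
  | nil => simp
  | cons h t ih => simp [List.foldl, ih]

theorem pv_outer (vals : List (List String)) (arr : List String) :
    vals.foldl (fun arr item => item.foldl (fun a x => a ++ [x]) arr) arr
      = arr ++ vals.flatMap id := by
  induction vals generalizing arr with
  | nil => simp
  | cons h t ih =>
    rw [List.foldl_cons, pv_inner, ih]
    simp

theorem dict_of_nested_lists_to_list_spec : Claim_equal_dict_of_nested_lists_to_list := by
  intro d _
  unfold Spec_dict_of_nested_lists_to_list dict_of_nested_lists_to_list dict_of_nested_lists_to_list_alt
  simp only [pv_outer, List.nil_append, List.flatMap_map, id]
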